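-- pv_equiv track=rewrite | github.com/achieveho/Mygrowth | 프로그래머스/0/181854. 배열의 길이에 따라 다른 연산하기/calc_len_arr.py | solution03
-- ===== SOURCE A (Python) =====
-- def solution03(arr, n):
--     ans = []
--     k = len(arr) % 2
--     for i, a in enumerate(arr):
--         if (i + k) % 2 != 0:
--             ans.append(a + n)
--         else:
--             ans.append(a)
--
--     return ans
-- ===== SOURCE B (Python) =====
-- def solution03(arr, n):
--     # Walk from the back: the last element always gets +n, then alternate.
--     ans = []
--     add = True
--     for a in reversed(arr):
--         ans.append(a + n if add else a)
--         add = not add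
--     ans.reverse()
--     return ans
-- ===== Notes on version B (the rewrite author's own statement) =====
-- stated objective: alternative
-- what changed: A walks the list front-to-back computing a parity test (i + len%2) % 2 for each index; B walks it back-to-front with a toggling boolean flag (the last element always gets +n), with no length/index arithmetic at all, and reverses the result.
import Mathlib
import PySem

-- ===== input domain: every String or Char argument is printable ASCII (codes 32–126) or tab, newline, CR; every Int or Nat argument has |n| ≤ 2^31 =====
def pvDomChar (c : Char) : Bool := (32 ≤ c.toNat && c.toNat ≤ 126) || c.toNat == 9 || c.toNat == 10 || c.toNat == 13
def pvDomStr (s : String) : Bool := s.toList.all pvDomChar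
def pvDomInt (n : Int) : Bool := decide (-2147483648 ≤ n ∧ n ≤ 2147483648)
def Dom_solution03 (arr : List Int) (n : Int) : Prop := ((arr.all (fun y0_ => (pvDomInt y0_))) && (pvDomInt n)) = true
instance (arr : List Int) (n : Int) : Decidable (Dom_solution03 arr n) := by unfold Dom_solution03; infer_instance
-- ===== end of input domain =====

-- B replaces A's front-to-back loop with index-parity arithmetic by a back-to-front
-- pass with a toggling flag (the last element always gets +n); objective: alternative decomposition.


-- ===== PORT A =====
-- ans = []; k = len(arr) % 2; for i, a in enumerate(arr): append a+n if (i+k)%2 != 0 else a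
def solution03 (arr : List Int) (n : Int) : List Int :=
  let k : Int := PySem.Int.mod (arr.length : Int) 2
  (PySem.List.enumerate arr).foldl
    (fun ans ia =>
      if PySem.Int.mod (ia.1 + k) 2 ≠ 0 then ans ++ [ia.2 + n] else ans ++ [ia.2])
    []

-- ===== PORT B =====
-- the loop body of Source B: traverse (already reversed) list, toggling `add`
def altGo (n : Int) : List Int → Bool → List Int
  | [], _ => []
  | a :: rest, add => (if add then a + n else a) :: altGo n rest !add

def solution03_alt (arr : List Int) (n : Int) : List Int :=
  (altGo n arr.reverse true).reverse

-- ===== PRECONDITION & SPEC =====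
def Spec_solution03 (arr : List Int) (n : Int) (out : List Int) : Prop := out = solution03_alt arr n
instance (arr : List Int) (n : Int) (out : List Int) : Decidable (Spec_solution03 arr n out) := by unfold Spec_solution03; infer_instance

-- ===== CLAIM (what is proved, stated in full; the proofs are below) =====
def Claim_equal_solution03 : Prop := ∀ (arr : List Int) (n : Int), Dom_solution03 arr n → Spec_solution03 arr n (solution03 arr n)

-- ===== LEMMAS AND PROOFS =====

theorem foldl_append_if_else {α β : Type} (p : α → Prop) [DecidablePred p] (f g : α → β)
    (l : List α) (acc : List β) :
    l.foldl (fun acc x => if p x then acc ++ [f x] else acc ++ [g x]) acc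
      = acc ++ l.map (fun x => if p x then f x else g x) := by
  induction l generalizing acc with
  | nil => simp
  | cons a l ih => by_cases h : p a <;> simp [h, ih, List.append_assoc]

theorem length_altGo (n : Int) (l : List Int) (b : Bool) : (altGo n l b).length = l.length := by
  induction l generalizing b with
  | nil => rfl
  | cons a l ih => simp [altGo, ih]

theorem getElem_altGo (n : Int) (l : List Int) (b : Bool) (j : Nat) (h : j < l.length)
    (h' : j < (altGo n l b).length) :
    (altGo n l b)[j] = if (decide (j % 2 = 0)) == b then l[j] + n else l[j] := by
  induction l generalizing b j with
  | nil => simp at h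
  | cons a l ih =>
    cases j with
    | zero => cases b <;> simp [altGo]
    | succ j =>
      have hj : j < l.length := by simpa using h
      have hj' : ∀ c, j < (altGo n l c).length := by intro c; simpa [length_altGo] using hj
      cases b with
      | false =>
        by_cases hp : j % 2 = 0
        · have h2 : ¬ ((j + 1) % 2 = 0) := by omega
          simp [altGo, ih true j hj (hj' true), hp, h2]
        · have h2 : (j + 1) % 2 = 0 := by omega
          simp [altGo, ih true j hj (hj' true), hp, h2]
      | true =>
        by_cases hp : j % 2 = 0
        · have h2 : ¬ ((j + 1) % 2 = 0) := by omega
          simp [altGo, ih false j hj (hj' false), hp, h2]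
        · have h2 : (j + 1) % 2 = 0 := by omega
          simp [altGo, ih false j hj (hj' false), hp, h2]

theorem solution03_eq_map (arr : List Int) (n : Int) :
    solution03 arr n = (PySem.List.enumerate arr).map
      (fun ia => if PySem.Int.mod (ia.1 + PySem.Int.mod (arr.length : Int) 2) 2 ≠ 0
                 then ia.2 + n else ia.2) := by
  show (PySem.List.enumerate arr).foldl
      (fun ans ia =>
        if PySem.Int.mod (ia.1 + PySem.Int.mod (arr.length : Int) 2) 2 ≠ 0
        then ans ++ [ia.2 + n] else ans ++ [ia.2]) [] = _
  rw [foldl_append_if_else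
       (fun ia : Int × Int => PySem.Int.mod (ia.1 + PySem.Int.mod (arr.length : Int) 2) 2 ≠ 0)
       (fun ia => ia.2 + n) (fun ia => ia.2)]
  simp

-- ===== VERDICT (by name: the statement is the Claim_ definition above) =====
theorem solution03_spec : Claim_equal_solution03 := by
  intro arr n _
  unfold Spec_solution03 solution03_alt
  rw [solution03_eq_map]
  apply List.ext_getElem
  · simp [length_altGo, PySem.List.length_enumerate]
  · intro i h1 h2
    have hi : i < arr.length := by simpa [length_altGo] using h2
    simp only [List.getElem_map, List.getElem_reverse, List.length_reverse, length_altGo]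
    rw [getElem_altGo n arr.reverse true (arr.length - 1 - i)
         (by simp; omega) (by simp [length_altGo]; omega)]
    simp only [List.getElem_reverse]
    have harr2 : arr.length - 1 - (arr.length - 1 - i) = i := by omega
    simp only [harr2, PySem.List.getElem_enumerate,
      show ∀ a : Int, PySem.Int.mod a 2 = a % 2 from
        fun a => PySem.Int.mod_eq_emod_of_pos (by norm_num)]
    split_ifs with hA hB hC <;>
      first
      | rfl
      | (exfalso; simp only [beq_iff_eq, decide_eq_true_eq] at *; omega)
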